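-- pv_equiv track=rewrite | github.com/XXXWANG/clawtrade-opportunity-screener | screener_skill.py | parse_symbol_list
-- ===== SOURCE A (Python) =====
-- def parse_symbol_list(text):
--     if not text:
--         return []
--     tokens = []
--     for raw in text.replace(",", " ").split():
--         value = raw.strip()
--         if value:
--             tokens.append(value)
--     return tokens
-- ===== SOURCE B (Python) =====
-- def parse_symbol_list(text):
--     # One manual character pass: ',' and whitespace are both separators.
--     if not text:
--         return []
--     tokens = []
--     cur = []
--     for c in text:
--         if c == "," or c.isspace():
--             if cur:
--                 tokens.append("".join(cur))
--                 cur = []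
--         else:
--             cur.append(c)
--     if cur:
--         tokens.append("".join(cur))
--     return tokens
-- ===== Notes on version B (the rewrite author's own statement) =====
-- stated objective: alternative
-- what changed: Replaces the replace-then-split-then-filter pipeline (which builds an intermediate string and an intermediate token list) with a single explicit character scan that flushes a token at each comma/whitespace separator.
import Mathlib
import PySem

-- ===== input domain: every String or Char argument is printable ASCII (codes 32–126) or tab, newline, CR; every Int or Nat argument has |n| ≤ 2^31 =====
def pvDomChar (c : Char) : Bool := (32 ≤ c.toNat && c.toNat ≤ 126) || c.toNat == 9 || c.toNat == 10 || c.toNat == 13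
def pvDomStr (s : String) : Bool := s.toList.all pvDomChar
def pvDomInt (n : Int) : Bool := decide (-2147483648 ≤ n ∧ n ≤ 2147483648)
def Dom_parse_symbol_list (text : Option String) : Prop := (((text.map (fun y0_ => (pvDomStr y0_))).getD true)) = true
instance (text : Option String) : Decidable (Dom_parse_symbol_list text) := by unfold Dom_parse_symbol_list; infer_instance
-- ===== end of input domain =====

-- B replaces A's replace-then-split-then-filter pipeline by a single explicit character
-- scan flushing a token at each comma/whitespace separator (alternative decomposition).

-- ===== PORT A =====
def parse_symbol_list (text : Option String) : List String :=
  match text with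
  | none => []
  | some s =>
    if s = "" then []
    else
      (PySem.Str.split₀ (PySem.Str.replace s "," " ")).foldl
        (fun tokens raw =>
          let value := PySem.Str.strip raw
          if value ≠ "" then tokens ++ [value] else tokens) []

-- ===== PORT B =====
-- the `for c in text` loop of Source B, with its two mutable accumulators `cur` and `tokens`
def pvScanB (chars : List Char) (cur : List Char) (tokens : List String) : List String :=
  match chars with
  | [] => if cur.isEmpty then tokens else tokens ++ [String.ofList cur]
  | c :: rest =>
    if c = ',' || PySem.Chars.isspace c then
      if cur.isEmpty then pvScanB rest [] tokens
      else pvScanB rest [] (tokens ++ [String.ofList cur])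
    else pvScanB rest (cur ++ [c]) tokens

def parse_symbol_list_alt (text : Option String) : List String :=
  match text with
  | none => []
  | some s =>
    if s = "" then []
    else pvScanB s.toList [] []

-- ===== PRECONDITION & SPEC =====
def Spec_parse_symbol_list (text : Option String) (out : List String) : Prop := out = parse_symbol_list_alt text
instance (text : Option String) (out : List String) : Decidable (Spec_parse_symbol_list text out) := by unfold Spec_parse_symbol_list; infer_instance

-- ===== CLAIM (what is proved, stated in full; the proofs are below) =====
def Claim_equal_parse_symbol_list : Prop := ∀ (text : Option String), Dom_parse_symbol_list text → Spec_parse_symbol_list text (parse_symbol_list text)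

-- ===== LEMMAS AND PROOFS =====

-- replacing the single character ',' by ' ' is a pointwise map
def pvSubst (c : Char) : Char := if c = ',' then ' ' else c

theorem pv_replace_go (fuel : Nat) (l acc : List Char) (h : l.length ≤ fuel) :
    PySem.Chars.replace.go [','] [' '] fuel l acc = acc.reverse ++ l.map pvSubst := by
  induction fuel generalizing l acc with
  | zero =>
    have : l = [] := List.length_eq_zero_iff.mp (Nat.le_zero.mp h)
    subst this; simp [PySem.Chars.replace.go]
  | succ n ih =>
    cases l with
    | nil => simp [PySem.Chars.replace.go]
    | cons c t =>
      by_cases hc : c = ','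
      · subst hc
        have hp : [','].isPrefixOf (',' :: t) = true := by simp [List.isPrefixOf]
        simp only [PySem.Chars.replace.go, hp, if_true]
        rw [ih]
        · simp [pvSubst]
        · simpa using Nat.le_of_succ_le_succ h
      · have hp : [','].isPrefixOf (c :: t) = false := by
          have : ¬(',' = c) := fun h => hc h.symm
          simp [List.isPrefixOf, this]
        simp only [PySem.Chars.replace.go, hp, Bool.false_eq_true, if_false]
        rw [ih]
        · simp [pvSubst, hc]
        · simpa using Nat.le_of_succ_le_succ h

theorem pv_replace_map (l : List Char) :
    PySem.Chars.replace l [','] [' '] = l.map pvSubst := by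
  simp only [PySem.Chars.replace, List.isEmpty_cons, Bool.false_eq_true, if_false]
  simpa using pv_replace_go l.length l [] le_rfl

-- split₀ tokens are nonempty and whitespace-free
theorem pv_split0_go_clean (l : List Char) (cur : List Char) (acc : List (List Char))
    (hcur : ∀ c ∈ cur, PySem.Chars.isspace c = false)
    (hacc : ∀ t ∈ acc, t ≠ [] ∧ ∀ c ∈ t, PySem.Chars.isspace c = false) :
    ∀ t ∈ PySem.Chars.split₀.go l cur acc,
      t ≠ [] ∧ ∀ c ∈ t, PySem.Chars.isspace c = false := by
  induction l generalizing cur acc with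
  | nil =>
    intro t ht
    simp only [PySem.Chars.split₀.go] at ht
    by_cases hc : cur.isEmpty
    · rw [if_pos hc] at ht
      exact hacc t (by simpa using ht)
    · rw [if_neg hc] at ht
      rcases List.mem_cons.mp (List.mem_reverse.mp ht) with h | h
      · subst h
        refine ⟨?_, ?_⟩
        · simp only [ne_eq, List.reverse_eq_nil_iff]
          simpa [List.isEmpty_iff] using hc
        · intro d hd; exact hcur d (List.mem_reverse.mp hd)
      · exact hacc t h
  | cons c rest ih =>
    intro t ht
    by_cases hs : PySem.Chars.isspace c
    · by_cases hc : cur.isEmpty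
      · simp only [PySem.Chars.split₀.go, hs, if_pos, hc] at ht
        exact ih [] acc (by simp) hacc t ht
      · simp only [PySem.Chars.split₀.go, hs, if_pos, hc, Bool.false_eq_true, if_false] at ht
        refine ih [] (cur.reverse :: acc) (by simp) ?_ t ht
        intro u hu
        rcases List.mem_cons.mp hu with hu | hu
        · subst hu
          constructor
          · simpa [List.isEmpty_iff] using hc
          · intro d hd; exact hcur d (List.mem_reverse.mp hd)
        · exact hacc u hu
    · simp only [PySem.Chars.split₀.go, hs, Bool.false_eq_true, if_false] at ht
      refine ih (c :: cur) acc ?_ hacc t ht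
      intro d hd
      rcases List.mem_cons.mp hd with hd | hd
      · simpa [hd] using hs
      · exact hcur d hd

-- whitespace-free strings are fixed by strip
theorem pv_dropWhile_clean (l : List Char) (h : ∀ c ∈ l, PySem.Chars.isspace c = false) :
    l.dropWhile PySem.Chars.isspace = l := by
  cases l with
  | nil => rfl
  | cons c t => simp [List.dropWhile, h c (by simp)]

theorem pv_strip_clean (l : List Char) (h : ∀ c ∈ l, PySem.Chars.isspace c = false) :
    PySem.Chars.strip l = l := by
  unfold PySem.Chars.strip PySem.Chars.lstrip PySem.Chars.rstrip
  rw [pv_dropWhile_clean l h, pv_dropWhile_clean l.reverse (fun c hc => h c (List.mem_reverse.mp hc)),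
    List.reverse_reverse]

-- A's filtering foldl is the identity on clean token lists
theorem pv_foldl_clean (ts : List (List Char)) (init : List String)
    (h : ∀ t ∈ ts, t ≠ [] ∧ ∀ c ∈ t, PySem.Chars.isspace c = false) :
    (ts.map String.ofList).foldl
      (fun tokens raw =>
        let value := PySem.Str.strip raw
        if value ≠ "" then tokens ++ [value] else tokens) init
      = init ++ ts.map String.ofList := by
  induction ts generalizing init with
  | nil => simp
  | cons t rest ih =>
    obtain ⟨hne, hclean⟩ := h t (by simp)
    have hstrip : PySem.Str.strip (String.ofList t) = String.ofList t := by
      simp only [PySem.Str.strip, String.toList_ofList, pv_strip_clean t hclean]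
    have hne' : String.ofList t ≠ "" := by
      simpa using hne
    simp only [List.map_cons, List.foldl_cons, hstrip, hne', if_true, ne_eq,
      not_false_eq_true]
    rw [ih (init ++ [String.ofList t]) (fun u hu => h u (by simp [hu]))]
    simp

-- accumulator lemma for split₀.go
theorem pv_split0_go_acc (l cur : List Char) (acc : List (List Char)) :
    PySem.Chars.split₀.go l cur acc = acc.reverse ++ PySem.Chars.split₀.go l cur [] := by
  induction l generalizing cur acc with
  | nil =>
    by_cases hc : cur.isEmpty <;> simp [PySem.Chars.split₀.go, hc]
  | cons c rest ih =>
    by_cases hs : PySem.Chars.isspace c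
    · by_cases hc : cur.isEmpty
      · simp only [PySem.Chars.split₀.go, hs, if_true, hc]
        exact ih [] acc
      · simp only [PySem.Chars.split₀.go, hs, if_true, hc, Bool.false_eq_true, if_false]
        rw [ih [] (cur.reverse :: acc), ih [] [cur.reverse]]
        simp
    · simp only [PySem.Chars.split₀.go, hs, Bool.false_eq_true, if_false]
      exact ih (c :: cur) acc

-- B's condition is A's condition after the substitution
theorem pv_cond (c : Char) :
    PySem.Chars.isspace (pvSubst c) = (c = ',' || PySem.Chars.isspace c) := by
  by_cases hc : c = ','
  · subst hc; simp [pvSubst]; decide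
  · simp [pvSubst, hc]

-- B's scan is split₀ of the substituted string
theorem pv_scan_eq (l cur : List Char) (tokens : List String) :
    pvScanB l cur tokens
      = tokens ++ (PySem.Chars.split₀.go (l.map pvSubst) cur.reverse []).map String.ofList := by
  induction l generalizing cur tokens with
  | nil =>
    by_cases hc : cur.isEmpty
    · have : cur = [] := List.isEmpty_iff.mp hc
      subst this
      simp [pvScanB, PySem.Chars.split₀.go]
    · simp [pvScanB, hc, PySem.Chars.split₀.go]
  | cons c rest ih =>
    by_cases hsep : (c = ',' || PySem.Chars.isspace c : Bool)
    · by_cases hc : cur.isEmpty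
      · have hcur : cur = [] := List.isEmpty_iff.mp hc
        subst hcur
        simp only [pvScanB, hsep, if_true, List.isEmpty_nil]
        rw [ih [] tokens]
        simp only [List.map_cons, PySem.Chars.split₀.go, pv_cond, hsep, if_true,
          List.reverse_nil, List.isEmpty_nil]
      · simp only [pvScanB, hsep, if_true, hc, Bool.false_eq_true, if_false]
        rw [ih [] (tokens ++ [String.ofList cur])]
        simp only [List.map_cons, PySem.Chars.split₀.go, pv_cond, hsep, if_true]
        have hcr : cur.reverse.isEmpty = false := by
          simpa using hc
        rw [hcr]
        simp only [Bool.false_eq_true, if_false]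
        rw [pv_split0_go_acc (rest.map pvSubst) [] [cur.reverse.reverse]]
        simp
    · have hcomma : ¬ c = ',' := by
        intro h; apply hsep; simp [h]
      have hss : PySem.Chars.isspace c = false := by
        cases h : PySem.Chars.isspace c
        · rfl
        · exact absurd (by simp [h]) hsep
      simp only [pvScanB, hsep, Bool.false_eq_true, if_false]
      rw [ih (cur ++ [c]) tokens]
      simp [PySem.Chars.split₀.go, pvSubst, hcomma, hss]

-- ===== VERDICT (by name: the statement is the Claim_ definition above) =====
theorem parse_symbol_list_spec : Claim_equal_parse_symbol_list := by
  intro text _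
  unfold Spec_parse_symbol_list parse_symbol_list parse_symbol_list_alt
  cases text with
  | none => rfl
  | some s =>
    by_cases hs : s = ""
    · simp [hs]
    · simp only [hs, if_false]
      rw [pv_scan_eq s.toList [] []]
      simp only [List.nil_append, List.reverse_nil]
      have hrep : (PySem.Str.replace s "," " ").toList = s.toList.map pvSubst := by
        rw [PySem.Str.toList_replace]
        have h1 : (",":String).toList = [','] := by decide
        have h2 : (" ":String).toList = [' '] := by decide
        rw [h1, h2, pv_replace_map]
      have hsplit : PySem.Str.split₀ (PySem.Str.replace s "," " ")
          = (PySem.Chars.split₀ (s.toList.map pvSubst)).map String.ofList := by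
        simp only [PySem.Str.split₀, hrep]
      rw [hsplit]
      unfold PySem.Chars.split₀
      rw [pv_foldl_clean _ []
        (pv_split0_go_clean (s.toList.map pvSubst) [] [] (by simp) (by simp))]
      simp
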